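-- pv_equiv track=rewrite | github.com/Jitendra300/projecteuler | fun2.py | Satisfies
-- ===== SOURCE A (Python) =====
-- def Satisfies(n):
--     ans = 0
--     n2 = n
--     while(n2):
--         ans += (n2%10)
--         n2 = n2//10
--
--     k = 1
--
--     if(ans == 1):
--         return False
--
--     while(True):
--         expression = pow(ans, k)
--         if(expression == n):
--             return True
--             break
--         elif(expression > n):
--             return False
--         k+=1
-- ===== SOURCE B (Python) =====
-- def Satisfies(n):
--     s = 0
--     m = n
--     while m:
--         s += m % 10
--         m //= 10
--     if s == 0:
--         return True
--     if s == 1: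
--         return False
--     m = n
--     while m % s == 0:
--         m //= s
--     return m == 1
-- ===== Notes on version B (the rewrite author's own statement) =====
-- stated objective: alternative
-- what changed: After the same digit-sum loop, B replaces A's upward search comparing pow(s,k) against n by repeated downward division of n by the digit sum followed by a test that the quotient reached one, with the degenerate digit-sum cases answered directly.
import Mathlib
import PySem

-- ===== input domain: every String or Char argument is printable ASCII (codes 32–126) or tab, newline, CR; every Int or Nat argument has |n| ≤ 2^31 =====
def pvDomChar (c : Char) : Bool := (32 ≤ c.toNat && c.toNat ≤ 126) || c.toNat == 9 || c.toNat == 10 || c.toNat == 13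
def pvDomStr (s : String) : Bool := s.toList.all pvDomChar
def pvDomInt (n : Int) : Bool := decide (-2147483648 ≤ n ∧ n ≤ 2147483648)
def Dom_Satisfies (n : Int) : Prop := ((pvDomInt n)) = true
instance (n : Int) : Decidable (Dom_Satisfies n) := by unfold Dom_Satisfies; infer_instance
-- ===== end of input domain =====

-- B keeps A's digit-sum loop but replaces the upward power search (pow(s,k) for k = 1,2,…)
-- by repeated downward division of n by s; equivalence of return values is proved on 0 ≤ n.

-- ===== PORT A =====
-- A's digit-sum loop 'while n2: ans += n2 % 10; n2 = n2 // 10'.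
-- Guard '0 < n2' (instead of Python's 'n2 != 0') is a totality guard: for negative n2 the
-- Python loop never terminates, and such inputs are outside Pre_Satisfies.
def digitSumA (n2 ans : Int) : Int :=
  if h : 0 < n2 then digitSumA (PySem.Int.floordiv n2 10) (ans + PySem.Int.mod n2 10) else ans
termination_by n2.toNat
decreasing_by
  have := PySem.Int.floordiv_eq_ediv_of_pos (a := n2) (b := 10) (by omega)
  have h2 : n2 / 10 < n2 := by omega
  have h3 : 0 ≤ n2 / 10 := by positivity
  omega

-- A's 'while True: expression = pow(ans,k); …' search.  The fuel argument is a totality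
-- guard only: at the call site the fuel is large enough that it is never exhausted on
-- any input where the Python loop terminates (proved in the lemmas below).
def powLoopA (s n : Int) (k : Nat) (fuel : Nat) : Bool :=
  match fuel with
  | 0 => false
  | fuel + 1 =>
    let expression := s ^ k
    if expression = n then true
    else if expression > n then false
    else powLoopA s n (k + 1) fuel

def Satisfies (n : Int) : Bool :=
  let ans := digitSumA n 0
  if ans = 1 then false
  else powLoopA ans n 1 (n.toNat + 2)

-- ===== PORT B =====
-- same digit-sum loop as A (B's Python keeps it verbatim)
def digitSumB (m s : Int) : Int :=
  if h : 0 < m then digitSumB (PySem.Int.floordiv m 10) (s + PySem.Int.mod m 10) else s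
termination_by m.toNat
decreasing_by
  have := PySem.Int.floordiv_eq_ediv_of_pos (a := m) (b := 10) (by omega)
  have h2 : m / 10 < m := by omega
  have h3 : 0 ≤ m / 10 := by positivity
  omega

-- B's 'while m % s == 0: m //= s'.  The conjuncts '2 ≤ s ∧ 0 < m' are totality guards:
-- at the call site s ≥ 2 and m = n ≥ 1 always hold, and they are invariant.
def divLoopB (m s : Int) : Int :=
  if h : PySem.Int.mod m s = 0 ∧ 2 ≤ s ∧ 0 < m then divLoopB (PySem.Int.floordiv m s) s else m
termination_by m.toNat
decreasing_by
  have := PySem.Int.floordiv_eq_ediv_of_pos (a := m) (b := s) (by omega)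
  have h2 : m / s < m := by
    apply Int.ediv_lt_of_lt_mul (by omega)
    nlinarith [h.2.1, h.2.2]
  have h3 : 0 ≤ m / s := by
    apply Int.ediv_nonneg <;> omega
  omega

def Satisfies_alt (n : Int) : Bool :=
  let s := digitSumB n 0
  if s = 0 then true
  else if s = 1 then false
  else divLoopB n s = 1

-- ===== PRECONDITION & SPEC =====
-- Pre_ excludes n < 0, on which the Python A's digit-sum loop never terminates (n2 stays -1).
def Pre_Satisfies (n : Int) : Prop := 0 ≤ n
instance (n : Int) : Decidable (Pre_Satisfies n) := by unfold Pre_Satisfies; infer_instance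
def pvWitness_Satisfies : Int := 512

def Spec_Satisfies (n : Int) (out : Bool) : Prop := out = Satisfies_alt n
instance (n : Int) (out : Bool) : Decidable (Spec_Satisfies n out) := by unfold Spec_Satisfies; infer_instance

-- ===== CLAIM (what is proved, stated in full; the proofs are below) =====
def Claim_equal_Satisfies : Prop := ∀ (n : Int), Dom_Satisfies n → Pre_Satisfies n → Spec_Satisfies n (Satisfies n)

-- ===== LEMMAS AND PROOFS =====

theorem digitSumB_eq_A_aux (N : Nat) : ∀ (m s : Int), m.toNat ≤ N → digitSumB m s = digitSumA m s := by
  induction N with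
  | zero =>
    intro m s hN
    rw [digitSumB, digitSumA]
    have h : ¬ 0 < m := by omega
    rw [dif_neg h, dif_neg h]
  | succ N ih =>
    intro m s hN
    rw [digitSumB, digitSumA]
    by_cases h : 0 < m
    · rw [dif_pos h, dif_pos h]
      apply ih
      have := PySem.Int.floordiv_eq_ediv_of_pos (a := m) (b := 10) (by norm_num)
      omega
    · rw [dif_neg h, dif_neg h]

theorem digitSumB_eq_A (m s : Int) : digitSumB m s = digitSumA m s :=
  digitSumB_eq_A_aux m.toNat m s (le_refl _)

theorem digitSumA_zero (a : Int) : digitSumA 0 a = a := by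
  rw [digitSumA]; simp

theorem digitSumA_lt_aux (N : Nat) : ∀ (n a : Int), n.toNat ≤ N → 0 < n → a < digitSumA n a := by
  induction N with
  | zero => intro n a hN hn; omega
  | succ N ih =>
    intro n a hN hn
    rw [digitSumA, dif_pos hn,
        PySem.Int.floordiv_eq_ediv_of_pos (by norm_num),
        PySem.Int.mod_eq_emod_of_pos (by norm_num)]
    by_cases h2 : 0 < n / 10
    · have := ih (n / 10) (a + n % 10) (by omega) h2
      omega
    · rw [digitSumA, dif_neg h2]
      omega

theorem digitSumA_lt (n a : Int) (hn : 0 < n) : a < digitSumA n a :=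
  digitSumA_lt_aux n.toNat n a (le_refl _) hn

theorem digitSumA_le_aux (N : Nat) : ∀ (n a : Int), n.toNat ≤ N → 0 ≤ n → digitSumA n a ≤ a + n := by
  induction N with
  | zero =>
    intro n a hN hn
    have hn0 : n = 0 := by omega
    subst hn0; rw [digitSumA_zero]; omega
  | succ N ih =>
    intro n a hN hn
    by_cases hp : 0 < n
    · rw [digitSumA, dif_pos hp,
          PySem.Int.floordiv_eq_ediv_of_pos (by norm_num),
          PySem.Int.mod_eq_emod_of_pos (by norm_num)]
      have := ih (n / 10) (a + n % 10) (by omega) (by omega)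
      omega
    · have hn0 : n = 0 := by omega
      subst hn0; rw [digitSumA_zero]; omega

theorem digitSumA_le (n a : Int) (hn : 0 ≤ n) : digitSumA n a ≤ a + n :=
  digitSumA_le_aux n.toNat n a (le_refl _) hn

theorem powLoopA_char (s n : Int) (hs : 2 ≤ s) :
    ∀ (fuel k : Nat), n < s ^ (k + fuel) →
      (powLoopA s n k fuel = true ↔ ∃ j, k ≤ j ∧ s ^ j = n) := by
  intro fuel
  induction fuel with
  | zero =>
    intro k hlt
    simp only [powLoopA, Bool.false_eq_true, false_iff]
    rintro ⟨j, hj, he⟩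
    have : s ^ k ≤ s ^ j := pow_le_pow_right₀ (by omega) hj
    simp only [Nat.add_zero] at hlt
    omega
  | succ fuel ih =>
    intro k hlt
    rw [powLoopA]
    split_ifs with h1 h2
    · simp only [true_iff]
      exact ⟨k, le_refl _, h1⟩
    · simp only [Bool.false_eq_true, false_iff]
      rintro ⟨j, hj, he⟩
      have : s ^ k ≤ s ^ j := pow_le_pow_right₀ (by omega) hj
      omega
    · have hlt' : n < s ^ (k + 1 + fuel) := by
        have : k + 1 + fuel = k + (fuel + 1) := by omega
        rw [this]; exact hlt
      rw [ih (k + 1) hlt']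
      constructor
      · rintro ⟨j, hj, he⟩; exact ⟨j, by omega, he⟩
      · rintro ⟨j, hj, he⟩
        refine ⟨j, ?_, he⟩
        rcases Nat.eq_or_lt_of_le hj with rfl | hj'
        · exact absurd he h1
        · omega

theorem divLoopB_char_aux (s : Int) (hs : 2 ≤ s) (N : Nat) :
    ∀ (m : Int), m.toNat ≤ N → 1 ≤ m → (divLoopB m s = 1 ↔ ∃ j : Nat, s ^ j = m) := by
  induction N with
  | zero => intro m hN hm; omega
  | succ N ih =>
    intro m hN hm
    by_cases hmod : PySem.Int.mod m s = 0
    · have hmod' : m % s = 0 := by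
        rwa [PySem.Int.mod_eq_emod_of_pos (by omega)] at hmod
      have hdvd : s ∣ m := Int.dvd_of_emod_eq_zero hmod'
      have hq1 : 1 ≤ m / s := by
        rcases hdvd with ⟨c, rfl⟩
        have hc : 1 ≤ c := by nlinarith
        rw [Int.mul_ediv_cancel_left _ (by omega)]; exact hc
      have hqlt : m / s < m := by
        apply Int.ediv_lt_of_lt_mul (by omega); nlinarith
      rw [divLoopB, dif_pos ⟨hmod, hs, by omega⟩,
          PySem.Int.floordiv_eq_ediv_of_pos (by omega)]
      rw [ih (m / s) (by omega) hq1]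
      constructor
      · rintro ⟨j, he⟩
        refine ⟨j + 1, ?_⟩
        rw [pow_succ', he]
        exact Int.mul_ediv_cancel' hdvd
      · rintro ⟨j, he⟩
        cases j with
        | zero =>
          have hm1 : m = 1 := by rw [← he, pow_zero]
          have h1s : (1 : Int) % s = 1 := Int.emod_eq_of_lt (by omega) (by omega)
          rw [hm1] at hmod'; omega
        | succ j =>
          refine ⟨j, ?_⟩
          rw [pow_succ, mul_comm] at he
          rw [← he, Int.mul_ediv_cancel_left _ (by omega : s ≠ 0)]
    · rw [divLoopB, dif_neg (by intro hc; exact hmod hc.1)]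
      constructor
      · intro h1; exact ⟨0, by rw [pow_zero, h1]⟩
      · rintro ⟨j, he⟩
        cases j with
        | zero => rw [← he, pow_zero]
        | succ j =>
          exfalso
          apply hmod
          rw [PySem.Int.mod_eq_emod_of_pos (by omega)]
          apply Int.emod_eq_zero_of_dvd
          exact ⟨s ^ j, by rw [← he, pow_succ, mul_comm]⟩

theorem divLoopB_char (s : Int) (hs : 2 ≤ s) (m : Int) (hm : 1 ≤ m) :
    divLoopB m s = 1 ↔ ∃ j : Nat, s ^ j = m :=
  divLoopB_char_aux s hs m.toNat m (le_refl _) hm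

-- ===== VERDICT (by name: the statement is the Claim_ definition above) =====
theorem Satisfies_spec : Claim_equal_Satisfies := by
  intro n _ hpre
  unfold Spec_Satisfies Satisfies Satisfies_alt
  rw [digitSumB_eq_A]
  have hpre' : (0 : Int) ≤ n := hpre
  by_cases hn0 : n = 0
  · subst hn0
    norm_num [digitSumA_zero, powLoopA]
  · have hn1 : 1 ≤ n := by omega
    have hs1 : 1 ≤ digitSumA n 0 := digitSumA_lt n 0 (by omega)
    have hsn : digitSumA n 0 ≤ n := by
      have := digitSumA_le n 0 hpre'
      omega
    set s := digitSumA n 0 with hsdef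
    by_cases hseq1 : s = 1
    · simp [hseq1]
    · have hs2 : 2 ≤ s := by omega
      have hn2 : 2 ≤ n := by omega
      rw [if_neg (by simp [hseq1]), if_neg (by omega), if_neg hseq1]
      have hfuel : n < s ^ (1 + (n.toNat + 2)) := by
        have h2p : (n.toNat : Int) < 2 ^ (n.toNat + 3) := by
          have := Nat.lt_two_pow_self (n := n.toNat)
          have hmono : (2:Nat) ^ n.toNat ≤ 2 ^ (n.toNat + 3) :=
            Nat.pow_le_pow_right (by omega) (by omega)
          exact_mod_cast by omega
        have hpow : (2 : Int) ^ (n.toNat + 3) ≤ s ^ (n.toNat + 3) :=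
          pow_le_pow_left₀ (by omega) (by omega) _
        have : 1 + (n.toNat + 2) = n.toNat + 3 := by omega
        rw [this]
        omega
      have hA := powLoopA_char s n hs2 (n.toNat + 2) 1 hfuel
      have hB := divLoopB_char s hs2 n hn1
      rcases hb : powLoopA s n 1 (n.toNat + 2) with _ | _
      · symm
        simp only [decide_eq_false_iff_not]
        intro hd
        rcases hB.mp hd with ⟨j, he⟩
        have hjne : j ≠ 0 := by
          intro h0; subst h0; simp at he; omega
        have : powLoopA s n 1 (n.toNat + 2) = true :=
          hA.mpr ⟨j, by omega, he⟩
        rw [hb] at this; exact absurd this (by simp)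
      · symm
        simp only [decide_eq_true_eq]
        rcases hA.mp hb with ⟨j, hj, he⟩
        exact hB.mpr ⟨j, he⟩
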